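-- pv_equiv track=rewrite | github.com/JinYosh/Coding-practice | LeetCode 75/Greatest Common Divisor of Strings.py | isDivisor1
-- ===== SOURCE A (Python) =====
-- def isDivisor1(s_str, str1):
--     curr_i = 0
--     while curr_i < len(str1):
--         if curr_i + len(s_str) <= len(str1):
--             l_str = str1[curr_i:curr_i + len(s_str)]
--             if l_str != s_str:
--                 return False
--         else:
--             l_str = str1[curr_i:]
--             if l_str != s_str:
--                 return False
--         curr_i += len(s_str)
--     return True
-- ===== SOURCE B (Python) =====
-- def isDivisor1(s_str, str1):
--     if not str1:
--         return True
--     if not s_str or len(str1) % len(s_str) != 0: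
--         return False
--     return s_str * (len(str1) // len(s_str)) == str1
-- ===== Notes on version B (the rewrite author's own statement) =====
-- stated objective: simpler
-- what changed: Replaced A's chunk-by-chunk slice loop by a closed-form divisibility test plus one string multiplication and comparison.
-- outside the precondition, e.g. on isDivisor1('', 'ab'): A does not finish within the time limit, B returns False
import Mathlib
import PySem

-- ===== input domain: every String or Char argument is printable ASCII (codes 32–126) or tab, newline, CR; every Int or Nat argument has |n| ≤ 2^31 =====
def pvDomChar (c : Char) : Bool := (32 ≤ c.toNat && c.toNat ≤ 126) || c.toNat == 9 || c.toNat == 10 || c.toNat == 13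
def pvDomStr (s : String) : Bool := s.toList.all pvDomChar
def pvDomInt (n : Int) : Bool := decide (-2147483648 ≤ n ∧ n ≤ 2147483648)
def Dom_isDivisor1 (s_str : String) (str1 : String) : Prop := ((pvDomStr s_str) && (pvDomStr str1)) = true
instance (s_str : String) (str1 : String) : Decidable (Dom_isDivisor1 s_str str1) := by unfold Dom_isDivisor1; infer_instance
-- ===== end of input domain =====

-- B replaces A's chunk-by-chunk slice loop with a closed-form divisibility test plus
-- one repetition-and-compare (objective: simpler; same asymptotic cost); A's while loop never terminates when s_str = "" and
-- str1 ≠ "", and Pre_ excludes exactly those inputs.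

-- ===== PORT A =====
-- A's while loop, transliterated with an explicit index `i` (curr_i) and a fuel counter:
-- each executed iteration advances i by s.length, so str1.length + 1 steps of fuel are
-- enough whenever the Python loop terminates (s nonempty, or the body never runs).
def isDivisor1Loop (fuel : Nat) (s t : List Char) (i : Nat) : Bool :=
  match fuel with
  | 0 => true  -- unreachable under Pre_ (fuel = t.length + 1 suffices)
  | fuel + 1 =>
    if i < t.length then
      if i + s.length ≤ t.length then
        if PySem.List.slice t (some (i : Int)) (some ((i : Int) + (s.length : Int))) ≠ s then
          false
        else isDivisor1Loop fuel s t (i + s.length)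
      else
        if PySem.List.slice t (some (i : Int)) none ≠ s then
          false
        else isDivisor1Loop fuel s t (i + s.length)
    else true

def isDivisor1 (s_str : String) (str1 : String) : Bool :=
  isDivisor1Loop (str1.toList.length + 1) s_str.toList str1.toList 0

-- ===== PORT B =====
-- len/%,// act on nonnegative ints only here, so Nat % and / are exactly Python's.
def isDivisor1_alt (s_str : String) (str1 : String) : Bool :=
  let s := s_str.toList
  let t := str1.toList
  if t = [] then true
  else if s = [] ∨ t.length % s.length ≠ 0 then false
  else decide (PySem.List.pyRepeat s ((t.length / s.length : Nat) : Int) = t)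

-- ===== PRECONDITION & SPEC =====
-- Pre_ excludes only s_str = "" with str1 ≠ "", where A's while loop never terminates (A returns on no such input).
def Pre_isDivisor1 (s_str : String) (str1 : String) : Prop :=
  s_str ≠ "" ∨ str1 = ""
instance (s_str : String) (str1 : String) : Decidable (Pre_isDivisor1 s_str str1) := by
  unfold Pre_isDivisor1; infer_instance

def pvWitness_isDivisor1 : String × String := ("ab", "abab")

def Spec_isDivisor1 (s_str : String) (str1 : String) (out : Bool) : Prop := out = isDivisor1_alt s_str str1
instance (s_str : String) (str1 : String) (out : Bool) : Decidable (Spec_isDivisor1 s_str str1 out) := by unfold Spec_isDivisor1; infer_instance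

-- ===== CLAIM (what is proved, stated in full; the proofs are below) =====
def Claim_equal_isDivisor1 : Prop := ∀ (s_str : String) (str1 : String), Dom_isDivisor1 s_str str1 → Pre_isDivisor1 s_str str1 → Spec_isDivisor1 s_str str1 (isDivisor1 s_str str1)

-- ===== LEMMAS AND PROOFS =====

-- What A's loop computes from position i on: the suffix r is an exact repetition of s.
def repCheck (s r : List Char) : Bool :=
  (r.length % s.length == 0) && decide ((List.replicate (r.length / s.length) s).flatten = r)

theorem repCheck_nil (s : List Char) : repCheck s [] = true := by
  simp [repCheck]

theorem repCheck_short (s r : List Char) (h0 : 0 < r.length) (hlt : r.length < s.length) :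
    repCheck s r = false := by
  have h1 : r.length % s.length ≠ 0 := by rw [Nat.mod_eq_of_lt hlt]; omega
  simp [repCheck, h1]

theorem repCheck_bad (s r : List Char) (hn : s.length ≠ 0) (hle : s.length ≤ r.length)
    (hpre : r.take s.length ≠ s) : repCheck s r = false := by
  by_contra h
  have h' : r.length % s.length = 0 ∧ (List.replicate (r.length / s.length) s).flatten = r := by
    simpa [repCheck] using h
  obtain ⟨hmod, hflat⟩ := h'
  have hk : 0 < r.length / s.length := Nat.div_pos hle (Nat.pos_of_ne_zero hn)
  obtain ⟨k, hk'⟩ := Nat.exists_eq_succ_of_ne_zero hk.ne'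
  rw [hk', List.replicate_succ, List.flatten_cons] at hflat
  apply hpre
  rw [← hflat, List.take_append_of_le_length (le_refl s.length), List.take_length]

theorem repCheck_step (s r : List Char) (hn : s.length ≠ 0)
    (hpre : r.take s.length = s) :
    repCheck s r = repCheck s (r.drop s.length) := by
  have hsplit : r = s ++ r.drop s.length := by
    conv_lhs => rw [← List.take_append_drop s.length r, hpre]
  generalize hm : r.drop s.length = m at hsplit ⊢
  rw [hsplit]
  unfold repCheck
  rw [List.length_append, Nat.add_comm s.length m.length, Nat.add_mod_right,
    Nat.add_div_right _ (Nat.pos_of_ne_zero hn), List.replicate_succ, List.flatten_cons]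
  simp

theorem loop_eq_repCheck (s t : List Char) (hn : s.length ≠ 0) :
    ∀ (fuel i : Nat), i ≤ t.length → t.length - i < fuel →
      isDivisor1Loop fuel s t i = repCheck s (t.drop i) := by
  intro fuel
  induction fuel with
  | zero => intro i _ h; omega
  | succ fuel ih =>
    intro i hi hf
    rw [isDivisor1Loop]
    by_cases hlt : i < t.length
    · simp only [hlt, if_true]
      by_cases hfits : i + s.length ≤ t.length
      · simp only [hfits, if_true, PySem.List.slice_natCast_add]
        by_cases heq : (t.drop i).take s.length = s
        · simp only [heq, ne_eq, not_true_eq_false, if_false]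
          have hdd : (t.drop i).drop s.length = t.drop (i + s.length) := by
            rw [List.drop_drop]
          rw [ih (i + s.length) (by omega) (by omega),
            repCheck_step s (t.drop i) hn heq, hdd]
        · simp only [heq, ne_eq, not_false_eq_true, if_true]
          exact (repCheck_bad s (t.drop i) hn (by simp; omega) heq).symm
      · simp only [hfits, if_false, PySem.List.slice_from_natCast]
        have hlen : (t.drop i).length = t.length - i := by simp
        have hne : t.drop i ≠ s := by
          intro h
          have := congrArg List.length h
          omega
        simp only [hne, ne_eq, not_false_eq_true, if_true]
        exact (repCheck_short s (t.drop i) (by omega) (by omega)).symm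
    · simp only [hlt, if_false]
      have : t.drop i = [] := List.drop_eq_nil_of_le (by omega)
      rw [this, repCheck_nil]

-- ===== VERDICT (by name: the statement is the Claim_ definition above) =====
theorem isDivisor1_spec : Claim_equal_isDivisor1 := by
  intro s_str str1 _ hpre
  unfold Spec_isDivisor1 isDivisor1 isDivisor1_alt
  show isDivisor1Loop (str1.toList.length + 1) s_str.toList str1.toList 0 =
    (if str1.toList = [] then true
     else if s_str.toList = [] ∨ str1.toList.length % s_str.toList.length ≠ 0 then false
     else decide (PySem.List.pyRepeat s_str.toList
       (Int.ofNat (str1.toList.length / s_str.toList.length)) = str1.toList))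
  by_cases htnil : str1.toList = []
  · rw [htnil, if_pos rfl]
    simp [isDivisor1Loop]
  · have hsne : s_str.toList ≠ [] := by
      rcases hpre with h | h
      · intro hc; exact h (String.toList_eq_nil_iff.mp hc)
      · exact absurd (by rw [h]; rfl) htnil
    have hn : s_str.toList.length ≠ 0 := by simpa using hsne
    rw [loop_eq_repCheck _ _ hn (str1.toList.length + 1) 0 (by omega) (by omega),
      List.drop_zero, if_neg htnil]
    by_cases hmod : str1.toList.length % s_str.toList.length = 0
    · rw [if_neg (by rintro (h | h) <;> [exact hsne h; exact h hmod])]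
      unfold repCheck
      have h1 : (str1.toList.length % s_str.toList.length == 0) = true := by simpa using hmod
      rw [h1, Bool.true_and]
      rfl
    · rw [if_pos (Or.inr hmod)]
      unfold repCheck
      have h1 : (str1.toList.length % s_str.toList.length == 0) = false := by simpa using hmod
      rw [h1, Bool.false_and]
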